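-- pv_equiv track=rewrite | github.com/zxc18772763792/CryptoTradingSystem | web/api/ai_research.py | _safe_strategy_name_fragment
-- ===== SOURCE A (Python) =====
-- def _safe_strategy_name_fragment(value: str, default: str = "strategy") -> str:
--     text = "".join(
--         ch if (str(ch).isascii() and str(ch).isalnum()) else "_"
--         for ch in str(value or "").strip()
--     )
--     while "__" in text:
--         text = text.replace("__", "_")
--     text = text.strip("_")
--     return text or default
-- ===== SOURCE B (Python) =====
-- def _safe_strategy_name_fragment(value: str, default: str = "strategy") -> str:
--     out = []
--     for ch in str(value or "").strip():
--         if ch.isascii() and ch.isalnum():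
--             out.append(ch)
--         elif out and out[-1] != "_":
--             out.append("_")
--     return "".join(out).rstrip("_") or default
-- ===== Notes on version B (the rewrite author's own statement) =====
-- stated objective: simpler
-- what changed: A maps every char to a letter-or-underscore string, repeatedly runs a full double-underscore-collapsing replace pass until none remain, then strips underscores from both ends; B is one accumulator pass that appends the separator only when the result is nonempty and does not already end in a separator, so no collapse loop and no leading strip exist and only a trailing rstrip remains.
import Mathlib
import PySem

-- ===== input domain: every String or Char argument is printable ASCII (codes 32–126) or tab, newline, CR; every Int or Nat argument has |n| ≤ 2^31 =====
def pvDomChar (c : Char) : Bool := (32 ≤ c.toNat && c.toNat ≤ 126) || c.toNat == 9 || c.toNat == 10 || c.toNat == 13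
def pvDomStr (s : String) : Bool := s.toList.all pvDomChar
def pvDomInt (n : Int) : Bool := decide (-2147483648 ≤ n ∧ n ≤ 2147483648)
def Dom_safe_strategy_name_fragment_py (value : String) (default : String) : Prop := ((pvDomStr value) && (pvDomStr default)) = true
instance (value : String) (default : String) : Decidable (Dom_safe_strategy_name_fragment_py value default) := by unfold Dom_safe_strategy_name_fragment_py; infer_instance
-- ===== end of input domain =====

-- B replaces A's map-then-collapse-then-strip pipeline with a single accumulator pass
-- (append a separator '_' only when the result is nonempty and does not already end in '_'):
-- objective "simpler" — no collapse loop and no leading-underscore strip exist in B at all.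

-- ===== PORT A =====
-- rOne and the four lemmas below are cited by collapseA's decreasing_by (termination of A's while loop):
-- one pass of Python's text.replace("__", "_") written structurally.


def rOne : List Char → List Char
  | [] => []
  | [c] => [c]
  | a :: b :: t => if a = '_' ∧ b = '_' then '_' :: rOne t else a :: rOne (b :: t)

theorem rOne_length_le (l : List Char) : (rOne l).length ≤ l.length := by
  fun_induction rOne <;> simp_all
  omega

theorem go_eq (fuel : Nat) (l acc : List Char) (h : l.length ≤ fuel) :
    PySem.Chars.replace.go ['_','_'] ['_'] fuel l acc = acc.reverse ++ rOne l := by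
  induction fuel generalizing l acc with
  | zero =>
    match l with
    | [] => simp [PySem.Chars.replace.go, rOne]
    | c :: t => simp at h
  | succ n ih =>
    match l with
    | [] => simp [PySem.Chars.replace.go, rOne]
    | [c] =>
      rw [PySem.Chars.replace.go]
      have hp : (['_','_'].isPrefixOf [c]) = false := by simp [List.isPrefixOf]
      simp only [hp, Bool.false_eq_true, if_false]
      rw [ih [] (c :: acc) (by simp)]
      simp [rOne]
    | a :: b :: t =>
      rw [PySem.Chars.replace.go]
      by_cases hab : a = '_' ∧ b = '_'
      · obtain ⟨ha, hb⟩ := hab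
        subst ha; subst hb
        have hp : (['_','_'].isPrefixOf ('_' :: '_' :: t)) = true := by simp [List.isPrefixOf]
        simp only [hp, if_true]
        rw [show List.drop ['_','_'].length ('_' :: '_' :: t) = t from rfl]
        rw [ih t (['_'].reverse ++ acc) (by simp at h ⊢; omega)]
        simp [rOne]
      · have hp : (['_','_'].isPrefixOf (a :: b :: t)) = false := by
          simp [List.isPrefixOf]
          intro ha hb; exact hab ⟨ha.symm, hb.symm⟩
        simp only [hp, Bool.false_eq_true, if_false]
        rw [ih (b :: t) (a :: acc) (by simp at h ⊢; omega)]
        simp [rOne, hab]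

theorem replace_eq_rOne (t : List Char) : PySem.Chars.replace t ['_','_'] ['_'] = rOne t := by
  rw [PySem.Chars.replace]
  rw [if_neg (by simp)]
  exact go_eq t.length t [] (le_refl _)

theorem rOne_length_lt (t : List Char) (h : ['_','_'] <:+: t) : (rOne t).length < t.length := by
  fun_induction rOne with
  | case1 => simp at h
  | case2 c =>
    exfalso
    obtain ⟨p, s, hp⟩ := h
    have := congrArg List.length hp
    simp at this; omega
  | case3 a b t hab ih =>
    have := rOne_length_le t
    simp; omega
  | case4 a b t hab ih =>
    have hin : ['_','_'] <:+: (b :: t) := by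
      rcases (List.infix_cons_iff.mp h) with hpre | hinf
      · exfalso
        obtain ⟨s, hs⟩ := hpre
        simp at hs
        exact hab ⟨hs.1.symm, hs.2.1.symm⟩
      · exact hinf
    have h2 := ih hin
    simp at h2 ⊢; omega

def okChar (c : Char) : Bool := c.toNat ≤ 127 && PySem.Chars.isalnum c    -- str(ch).isascii() and str(ch).isalnum()

def mapA (c : Char) : Char := if okChar c then c else '_'

def collapseA (t : List Char) : List Char :=
  if PySem.Chars.isIn ['_','_'] t then collapseA (PySem.Chars.replace t ['_','_'] ['_']) else t
termination_by t.length
decreasing_by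
  rw [replace_eq_rOne]
  exact rOne_length_lt t ((PySem.Chars.isIn_iff_infix _ _).mp (by assumption))

def safe_strategy_name_fragment_py (value : String) (default : String) : String :=
  let v := if value == "" then "" else value           -- value or ""
  let s := PySem.Chars.strip v.toList                   -- .strip()
  let text := s.map mapA                                -- "".join(ch if … else "_")
  let text := collapseA text                            -- while "__" in text: replace
  let text := PySem.Chars.stripChars text ['_']         -- .strip("_")
  if text = [] then default else String.ofList text         -- text or default

-- ===== PORT B =====

def bStep (acc : List Char) (c : Char) : List Char :=
  if okChar c then acc ++ [c]
  else if acc ≠ [] ∧ acc.getLast? ≠ some '_' then acc ++ ['_'] else acc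

def safe_strategy_name_fragment_py_alt (value : String) (default : String) : String :=
  let v := if value == "" then "" else value            -- str(value or "")
  let s := PySem.Chars.strip v.toList                   -- .strip()
  let out := s.foldl bStep []                           -- the accumulator loop
  let res := (out.reverse.dropWhile (· == '_')).reverse -- .rstrip("_") (hand port: drop trailing '_'s; exact)
  if res = [] then default else String.ofList res       -- "or default"

-- ===== PRECONDITION & SPEC =====
def Spec_safe_strategy_name_fragment_py (value : String) (default : String) (out : String) : Prop := out = safe_strategy_name_fragment_py_alt value default
instance (value : String) (default : String) (out : String) : Decidable (Spec_safe_strategy_name_fragment_py value default out) := by unfold Spec_safe_strategy_name_fragment_py; infer_instance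

-- ===== CLAIM (what is proved, stated in full; the proofs are below) =====
def Claim_equal_safe_strategy_name_fragment_py : Prop := ∀ (value : String) (default : String), Dom_safe_strategy_name_fragment_py value default → Spec_safe_strategy_name_fragment_py value default (safe_strategy_name_fragment_py value default)

-- ===== LEMMAS AND PROOFS =====
-- sqz is the canonical "collapse every run of underscores to one" form both pipelines are reduced to.

def sqz : List Char → List Char
  | [] => []
  | c :: t => if c = '_' then '_' :: sqz (t.dropWhile (· == '_')) else c :: sqz t
termination_by t => t.length
decreasing_by
  · have := List.length_dropWhile_le (fun c => c == '_') t; simp; omega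
  · simp

def g : Bool → List Char → List Char
  | _, [] => []
  | b, c :: t => if c = '_' then (if b then '_' :: g false t else g false t) else c :: g true t

theorem g_eq_sq (m : List Char) :
    g false m = sqz (m.dropWhile (· == '_')) ∧ g true m = sqz m := by
  induction m with
  | nil => simp [g, sqz]
  | cons c t ih =>
    by_cases hc : c = '_'
    · subst hc
      constructor
      · rw [g, if_pos rfl, List.dropWhile_cons_of_pos (by simp)]
        exact ih.1
      · rw [g, if_pos rfl, sqz, if_pos rfl]
        simp [ih.1]
    · constructor
      · rw [g, if_neg hc, List.dropWhile_cons_of_neg (by simp [hc]), sqz, if_neg hc, ih.2]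
      · rw [g, if_neg hc, sqz, if_neg hc, ih.2]

theorem head_dropWhile_ne (t : List Char) :
    t.dropWhile (· == '_') = [] ∨ ∃ c u, t.dropWhile (· == '_') = c :: u ∧ c ≠ '_' := by
  induction t with
  | nil => simp
  | cons c t ih =>
    by_cases hc : c = '_'
    · subst hc; rw [List.dropWhile_cons_of_pos (by simp)]; exact ih
    · rw [List.dropWhile_cons_of_neg (by simp [hc])]
      exact Or.inr ⟨c, t, rfl, hc⟩

theorem dropWhile_sqz (m : List Char) :
    (sqz m).dropWhile (· == '_') = sqz (m.dropWhile (· == '_')) := by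
  match m with
  | [] => simp [sqz]
  | c :: t =>
    by_cases hc : c = '_'
    · subst hc
      rw [sqz, if_pos rfl, List.dropWhile_cons_of_pos (by simp),
          List.dropWhile_cons_of_pos (by simp)]
      rcases head_dropWhile_ne t with h | ⟨d, u, h, hd⟩
      · rw [h]; simp [sqz]
      · rw [h, sqz, if_neg hd, List.dropWhile_cons_of_neg (by simp [hd])]
    · rw [sqz, if_neg hc, List.dropWhile_cons_of_neg (by simp [hc]),
          List.dropWhile_cons_of_neg (by simp [hc]), sqz, if_neg hc]

theorem sqz_of_not_infix (t : List Char) (h : ¬ (['_','_'] <:+: t)) : sqz t = t := by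
  induction t with
  | nil => simp [sqz]
  | cons c t ih =>
    have ht : ¬ (['_','_'] <:+: t) := fun hi => h (List.infix_cons_iff.mpr (Or.inr hi))
    by_cases hc : c = '_'
    · subst hc
      have hhd : t.dropWhile (· == '_') = t := by
        match t with
        | [] => simp
        | d :: u =>
          have hd : d ≠ '_' := by
            intro hd; subst hd
            exact h (List.infix_cons_iff.mpr (Or.inl ⟨u, rfl⟩))
          rw [List.dropWhile_cons_of_neg (by simp [hd])]
      rw [sqz, if_pos rfl, hhd, ih ht]
    · rw [sqz, if_neg hc, ih ht]

theorem rOne_head (b : Char) (t : List Char) (hb : b ≠ '_') :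
    ∃ u, rOne (b :: t) = b :: u := by
  match t with
  | [] => exact ⟨[], rfl⟩
  | c :: t =>
    rw [rOne, if_neg (by simp [hb])]
    exact ⟨_, rfl⟩

theorem sqz_rOne (t : List Char) :
    sqz (rOne t) = sqz t ∧
    sqz ((rOne t).dropWhile (· == '_')) = sqz (t.dropWhile (· == '_')) := by
  fun_induction rOne with
  | case1 => exact ⟨rfl, rfl⟩
  | case2 c => exact ⟨rfl, rfl⟩
  | case3 a b t hab ih =>
    obtain ⟨ha, hb⟩ := hab
    subst ha; subst hb
    constructor
    · rw [sqz, if_pos rfl, sqz, if_pos rfl,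
          List.dropWhile_cons_of_pos (by simp), ih.2]
    · rw [List.dropWhile_cons_of_pos (by simp), List.dropWhile_cons_of_pos (by simp),
          List.dropWhile_cons_of_pos (by simp), ih.2]
  | case4 a b t hab ih =>
    by_cases hA : a = '_'
    · subst hA
      have hb : b ≠ '_' := fun h => hab ⟨rfl, h⟩
      obtain ⟨u, hu⟩ := rOne_head b t hb
      have hdw : (rOne (b :: t)).dropWhile (· == '_') = rOne (b :: t) := by
        rw [hu, List.dropWhile_cons_of_neg (by simp [hb])]
      constructor
      · rw [sqz, if_pos rfl, sqz, if_pos rfl, hdw,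
            List.dropWhile_cons_of_neg (by simp [hb]), ih.1]
      · rw [List.dropWhile_cons_of_pos (by simp), List.dropWhile_cons_of_pos (by simp), hdw,
            List.dropWhile_cons_of_neg (by simp [hb]), ih.1]
    · have hdw1 : (a :: rOne (b :: t)).dropWhile (· == '_') = a :: rOne (b :: t) := by
        rw [List.dropWhile_cons_of_neg (by simp [hA])]
      have hdw2 : (a :: b :: t).dropWhile (· == '_') = a :: b :: t := by
        rw [List.dropWhile_cons_of_neg (by simp [hA])]
      constructor
      · rw [sqz, if_neg hA, sqz, if_neg hA, ih.1]
      · rw [hdw1, hdw2, sqz, if_neg hA, sqz, if_neg hA, ih.1]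

theorem collapseA_eq_sqz (t : List Char) : collapseA t = sqz t := by
  rw [collapseA]
  by_cases h : PySem.Chars.isIn ['_','_'] t = true
  · rw [if_pos h, replace_eq_rOne]
    have hlt := rOne_length_lt t ((PySem.Chars.isIn_iff_infix _ _).mp h)
    rw [collapseA_eq_sqz (rOne t), (sqz_rOne t).1]
  · rw [if_neg h]
    exact (sqz_of_not_infix t ((PySem.Chars.isIn_eq_false_iff _ _).mp (by simpa using h))).symm
termination_by t.length

theorem isalnum_us : PySem.Chars.isalnum '_' = false := by decide

theorem okChar_ne_us {c : Char} (h : okChar c = true) : c ≠ '_' := by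
  intro hc; subst hc; simp [okChar, isalnum_us] at h

theorem foldl_bStep (s : List Char) (acc : List Char) :
    s.foldl bStep acc =
      acc ++ g (decide (acc ≠ [] ∧ acc.getLast? ≠ some '_')) (s.map mapA) := by
  induction s generalizing acc with
  | nil => simp [g]
  | cons c s ih =>
    rw [List.foldl_cons, List.map_cons, ih]
    by_cases hok : okChar c = true
    · have hc := okChar_ne_us hok
      rw [bStep, if_pos hok]
      rw [show mapA c = c from by simp [mapA, hok]]
      rw [g, if_neg hc]
      have : (decide (acc ++ [c] ≠ [] ∧ (acc ++ [c]).getLast? ≠ some '_')) = true := by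
        simp [hc]
      rw [this]
      simp
    · rw [bStep, if_neg hok]
      rw [show mapA c = '_' from by simp [mapA, hok]]
      rw [g, if_pos rfl]
      by_cases hfl : acc ≠ [] ∧ acc.getLast? ≠ some '_'
      · rw [if_pos hfl, decide_eq_true hfl, if_pos rfl]
        have : (decide (acc ++ ['_'] ≠ [] ∧ (acc ++ ['_']).getLast? ≠ some '_')) = false := by
          simp
        rw [this]
        simp
      · rw [if_neg hfl, decide_eq_false hfl]
        simp

theorem contains_us : (fun c => List.contains ['_'] c) = (fun c : Char => c == '_') := by
  funext c
  rw [List.contains_cons, List.contains_nil, Bool.or_false]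

theorem main_eq (value default : String) :
    safe_strategy_name_fragment_py value default =
      safe_strategy_name_fragment_py_alt value default := by
  rw [safe_strategy_name_fragment_py, safe_strategy_name_fragment_py_alt]
  set v := if value == "" then "" else value with hv
  set s := PySem.Chars.strip v.toList with hs
  have hfold : s.foldl bStep [] = g false (s.map mapA) := by
    rw [foldl_bStep]
    rw [show (decide ((([] : List Char)) ≠ [] ∧ (([] : List Char)).getLast? ≠ some '_')) = false from by decide]
    rw [List.nil_append]
  have hlist : PySem.Chars.stripChars (collapseA (s.map mapA)) ['_'] =
      ((s.foldl bStep []).reverse.dropWhile (· == '_')).reverse := by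
    rw [collapseA_eq_sqz, PySem.Chars.stripChars, contains_us, dropWhile_sqz,
        hfold, (g_eq_sq (s.map mapA)).1]
  rw [hlist]

-- ===== VERDICT (by name: the statement is the Claim_ definition above) =====
theorem safe_strategy_name_fragment_py_spec : Claim_equal_safe_strategy_name_fragment_py := by
  intro value default _
  unfold Spec_safe_strategy_name_fragment_py
  exact main_eq value default
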